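-- pv_equiv track=rewrite | github.com/elliotschu/crosslingual-el | codebase/el_scorer.py | best_linking
-- ===== SOURCE A (Python) =====
-- def best_linking (linking, el2kbid):
--     """
--     return a subset of the linking consisting of only the highest confidence link for each element in el2kbid
--     """
--     new_linking = dict()
--     for m in el2kbid.keys():
--         links = el2kbid[m]
--         kb_id, conf = links[0] # highest confidence kb_id
--
--         if kb_id in new_linking.keys():
--             new_linking[kb_id].add(m)
--         else:
--             new_linking[kb_id] = set([m])
--     return new_linking
-- ===== SOURCE B (Python) =====
-- def best_linking(linking, el2kbid):
--     """
--     return a subset of the linking consisting of only the highest confidence link for each element in el2kbid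
--     """
--     # two-phase rebuild: first the distinct best kb ids in first-appearance order,
--     # then one filtering scan of el2kbid per kb id
--     order = dict.fromkeys(links[0][0] for links in el2kbid.values())
--     return {kb: {m for m, links in el2kbid.items() if links[0][0] == kb}
--             for kb in order}
-- ===== Notes on version B (the rewrite author's own statement) =====
-- stated objective: alternative
-- what changed: A groups in a single pass with a hash dict of growing sets; B first extracts the distinct best kb ids (dict.fromkeys over the values) and then builds each group by a separate filtering comprehension over el2kbid, so no mutable grouping dict is maintained.
import Mathlib
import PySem

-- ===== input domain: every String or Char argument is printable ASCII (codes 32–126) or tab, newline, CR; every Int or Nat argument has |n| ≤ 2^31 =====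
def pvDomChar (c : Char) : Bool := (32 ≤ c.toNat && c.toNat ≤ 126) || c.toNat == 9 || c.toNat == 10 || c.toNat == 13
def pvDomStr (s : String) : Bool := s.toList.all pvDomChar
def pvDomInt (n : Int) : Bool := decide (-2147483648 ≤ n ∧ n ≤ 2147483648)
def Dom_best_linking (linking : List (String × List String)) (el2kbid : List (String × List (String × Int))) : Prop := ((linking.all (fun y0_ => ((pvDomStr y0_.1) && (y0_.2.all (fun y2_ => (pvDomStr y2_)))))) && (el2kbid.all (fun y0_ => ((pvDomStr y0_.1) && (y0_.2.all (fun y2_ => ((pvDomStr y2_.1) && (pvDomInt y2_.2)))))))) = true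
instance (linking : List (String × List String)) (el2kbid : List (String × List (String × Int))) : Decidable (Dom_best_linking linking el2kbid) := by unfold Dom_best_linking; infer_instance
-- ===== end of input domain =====

-- B replaces A's one-pass mutable-dict grouping by a two-phase rebuild (distinct best kb ids first,
-- then one filtering scan per id); equal return value, no speed claim.

-- ===== PORT A =====
-- new_linking = dict(); for m in el2kbid.keys(): links = el2kbid[m]; kb_id, conf = links[0]; …
def best_linking (linking : List (String × List String)) (el2kbid : List (String × List (String × Int))) : List (String × List String) :=
  let d := PySem.Dict.ofList el2kbid
  (d.keys.foldl (fun (nl : PySem.Dict String (PySem.Set String)) m =>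
      match d.get? m with
      | none => nl            -- unreachable: m is drawn from d.keys
      | some links =>
        match PySem.List.pyGet? links 0 with
        | none => nl          -- links[0] raises IndexError; Pre_ excludes this
        | some (kb_id, _conf) =>
          if nl.contains kb_id then nl.modify kb_id [] (fun s => PySem.Set.add s m)
          else nl.insert kb_id (PySem.Set.ofList [m]))
    PySem.Dict.empty).items

-- ===== PORT B =====
-- links[0][0], the best kb id of a value list (none = IndexError; Pre_ excludes it)
def pvBest (links : List (String × Int)) : Option String :=
  (PySem.List.pyGet? links 0).map (·.1)

-- order = dict.fromkeys(links[0][0] for links in el2kbid.values());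
-- {kb: {m for m, links in el2kbid.items() if links[0][0] == kb} for kb in order}
def best_linking_alt (linking : List (String × List String)) (el2kbid : List (String × List (String × Int))) : List (String × List String) :=
  let d := PySem.Dict.ofList el2kbid
  let order := PySem.List.dedup (d.values.filterMap pvBest)
  order.map (fun kb => (kb, d.items.filterMap (fun p => if pvBest p.2 == some kb then some p.1 else none)))

-- ===== PRECONDITION & SPEC =====
-- Pre_ excludes exactly the inputs on which A raises: a mention whose (effective, i.e. last-bound)
-- link list is empty makes 'links[0]' raise IndexError.
def Pre_best_linking (linking : List (String × List String)) (el2kbid : List (String × List (String × Int))) : Prop :=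
  ∀ p ∈ (PySem.Dict.ofList el2kbid).items, p.2 ≠ []
instance (linking : List (String × List String)) (el2kbid : List (String × List (String × Int))) : Decidable (Pre_best_linking linking el2kbid) := by unfold Pre_best_linking; infer_instance

def pvWitness_best_linking : (List (String × List String)) × (List (String × List (String × Int))) :=
  ([("m1", ["k1"])], [("m1", [("k1", 3)]), ("m2", [("k1", 2)]), ("m3", [("k2", 5)])])

def Spec_best_linking (linking : List (String × List String)) (el2kbid : List (String × List (String × Int))) (out : List (String × List String)) : Prop := out = best_linking_alt linking el2kbid
instance (linking : List (String × List String)) (el2kbid : List (String × List (String × Int))) (out : List (String × List String)) : Decidable (Spec_best_linking linking el2kbid out) := by unfold Spec_best_linking; infer_instance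

-- ===== CLAIM (what is proved, stated in full; the proofs are below) =====
def Claim_equal_best_linking : Prop := ∀ (linking : List (String × List String)) (el2kbid : List (String × List (String × Int))), Dom_best_linking linking el2kbid → Pre_best_linking linking el2kbid → Spec_best_linking linking el2kbid (best_linking linking el2kbid)

-- ===== LEMMAS AND PROOFS =====

-- A's loop body, rewritten over the (key, value) pairs themselves
def pvStep (nl : PySem.Dict String (PySem.Set String)) (p : String × List (String × Int)) : PySem.Dict String (PySem.Set String) :=
  match PySem.List.pyGet? p.2 0 with
  | none => nl
  | some (kb_id, _conf) =>
    if nl.contains kb_id then nl.modify kb_id [] (fun s => PySem.Set.add s p.1)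
    else nl.insert kb_id (PySem.Set.ofList [p.1])

-- B's shape over an arbitrary pair list
def pvRHS (ps : List (String × List (String × Int))) : List (String × List String) :=
  (PySem.List.dedup (ps.filterMap (fun p => pvBest p.2))).map
    (fun kb => (kb, ps.filterMap (fun p => if pvBest p.2 == some kb then some p.1 else none)))

lemma pv_dedup_append_singleton {α : Type} [BEq α] (xs : List α) (x : α) :
    PySem.List.dedup (xs ++ [x]) = PySem.Set.add (PySem.List.dedup xs) x := by
  simp [PySem.List.dedup_eq_ofList, PySem.Set.ofList_eq_foldl, List.foldl_append]

lemma pv_add_of_mem {α : Type} [BEq α] [LawfulBEq α] (s : PySem.Set α) (x : α) (h : x ∈ s) :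
    PySem.Set.add s x = s := by
  simp [PySem.Set.add, h]

lemma pv_add_of_not_mem {α : Type} [BEq α] [LawfulBEq α] (s : PySem.Set α) (x : α) (h : x ∉ s) :
    PySem.Set.add s x = s ++ [x] := by
  simp [PySem.Set.add, h]

lemma pv_filterMap_sel_nil (ps : List (String × List (String × Int))) (kb : String)
    (h : kb ∉ ps.filterMap (fun p => pvBest p.2)) :
    ps.filterMap (fun p => if pvBest p.2 == some kb then some p.1 else none) = [] := by
  rw [List.filterMap_eq_nil_iff]
  intro p hp
  by_cases hb : pvBest p.2 = some kb
  · exact absurd (List.mem_filterMap.2 ⟨p, hp, hb⟩) h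
  · simp [hb]

lemma pv_mem_filterMap_sel (ps : List (String × List (String × Int))) (kb x : String)
    (h : x ∈ ps.filterMap (fun p => if pvBest p.2 == some kb then some p.1 else none)) :
    x ∈ ps.map Prod.fst := by
  obtain ⟨p, hp, hx⟩ := List.mem_filterMap.1 h
  by_cases hb : pvBest p.2 = some kb
  · simp only [hb, BEq.rfl, if_true, Option.some.injEq] at hx
    exact hx ▸ List.mem_map.2 ⟨p, hp, rfl⟩
  · simp [hb] at hx

lemma pvMain (ps : List (String × List (String × Int)))
    (hk : (ps.map Prod.fst).Nodup) (hv : ∀ p ∈ ps, p.2 ≠ []) :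
    (ps.foldl pvStep PySem.Dict.empty).items = pvRHS ps := by
  induction ps using List.reverseRecOn with
  | nil => simp [pvRHS, PySem.List.dedup_eq_ofList, PySem.Set.ofList_eq_foldl]; rfl
  | append_singleton qs p ih =>
    have hk' : (qs.map Prod.fst).Nodup := by
      simpa using (List.nodup_append.1 (by simpa using hk)).1
    have hm : p.1 ∉ qs.map Prod.fst := by
      have h2 : (qs.map Prod.fst ++ [p.1]).Nodup := by simpa using hk
      simp [List.nodup_append] at h2
      intro hmem
      obtain ⟨q, hq, hfst⟩ := List.mem_map.1 hmem
      exact h2.2 q.1 q.2 hq hfst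
    have hv' : ∀ q ∈ qs, q.2 ≠ [] := fun q hq => hv q (by simp [hq])
    have hI := ih hk' hv'
    obtain ⟨m, links⟩ := p
    obtain ⟨⟨kb, c⟩, tl, rfl⟩ : ∃ x t, links = x :: t := by
      cases links with
      | nil => exact absurd rfl (hv (m, []) (by simp))
      | cons x t => exact ⟨x, t, rfl⟩
    set D := qs.foldl pvStep PySem.Dict.empty with hD
    set B := qs.filterMap (fun p => pvBest p.2) with hB
    set K := PySem.List.dedup B with hK
    set F : String → List String :=
      fun kb' => qs.filterMap (fun p => if pvBest p.2 == some kb' then some p.1 else none) with hF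
    have hRHSqs : pvRHS qs = K.map (fun kb' => (kb', F kb')) := rfl
    have hkeys : D.keys = K := by
      have hkd : D.keys = D.items.map Prod.fst := by simp only [PySem.Dict.keys]
      rw [hkd, hI, hRHSqs, List.map_map]
      exact List.map_id' K
    have hKnd : K.Nodup := by rw [hK, PySem.List.dedup_eq_ofList]; exact PySem.Set.nodup_ofList B
    have hDnd : D.keys.Nodup := hkeys ▸ hKnd
    have hgetD : ∀ k' ∈ K, D.getD k' [] = F k' := by
      intro k' hk'
      have hmem : (k', F k') ∈ D.items := by
        rw [hI, hRHSqs]; exact List.mem_map.2 ⟨k', hk', rfl⟩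
      exact PySem.Dict.getD_of_mem_items D hmem hDnd []
    have hbest : pvBest ((kb, c) :: tl) = some kb := by simp [pvBest]
    have hBnew : (qs ++ [(m, (kb, c) :: tl)]).filterMap (fun p => pvBest p.2) = B ++ [kb] := by
      have h1 : List.filterMap (fun p => pvBest p.2) [(m, (kb, c) :: tl)] = [kb] := by
        simp [pvBest]
      rw [List.filterMap_append, h1]
    have hFnew : ∀ k', (qs ++ [(m, (kb, c) :: tl)]).filterMap
        (fun p => if pvBest p.2 == some k' then some p.1 else none)
        = F k' ++ (if kb = k' then [m] else []) := by
      intro k'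
      rw [List.filterMap_append, hF]
      congr 1
      by_cases hkk : kb = k' <;> simp [pvBest, hkk]
    have hstep : (qs ++ [(m, (kb, c) :: tl)]).foldl pvStep PySem.Dict.empty
        = pvStep D (m, (kb, c) :: tl) := by rw [List.foldl_append]; rfl
    rw [hstep]
    have hstep2 : pvStep D (m, (kb, c) :: tl)
        = if D.contains kb then D.modify kb [] (fun s => PySem.Set.add s m)
          else D.insert kb (PySem.Set.ofList [m]) := by
      simp [pvStep]
    rw [hstep2]
    cases hc : D.contains kb with
    | true =>
      have hkbK : kb ∈ K := hkeys ▸ (PySem.Dict.contains_iff_mem_keys D kb).1 hc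
      simp only [if_true]
      have hkeysM : (D.modify kb [] (fun s => PySem.Set.add s m)).keys = K := by
        rw [PySem.Dict.keys_modify, PySem.Dict.keys_insert_of_contains _ _ hc, hkeys]
      have hndM : (D.modify kb [] (fun s => PySem.Set.add s m)).keys.Nodup := hkeysM ▸ hKnd
      rw [PySem.Dict.items_eq_map_keys _ hndM [], hkeysM]
      unfold pvRHS
      rw [hBnew, pv_dedup_append_singleton, ← hK, pv_add_of_mem K kb hkbK]
      apply List.map_congr_left
      intro k' hk'K
      rw [PySem.Dict.getD_modify, hFnew k']
      by_cases hkk : k' = kb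
      · subst hkk
        rw [if_pos rfl, if_pos rfl, hgetD k' hk'K]
        have hnm : m ∉ F k' := fun hmm => hm (pv_mem_filterMap_sel qs k' m hmm)
        exact congrArg _ (pv_add_of_not_mem (F k') m hnm)
      · rw [if_neg hkk, if_neg (fun h => hkk h.symm), hgetD k' hk'K, List.append_nil]
    | false =>
      have hkbK : kb ∉ K := fun hmem =>
        by rw [(PySem.Dict.contains_iff_mem_keys D kb).2 (hkeys ▸ hmem)] at hc; cases hc
      simp only [Bool.false_eq_true, if_false]
      rw [PySem.Dict.items_insert_of_not_contains _ _ hc, hI]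
      unfold pvRHS
      rw [hBnew, pv_dedup_append_singleton, ← hK,
        pv_add_of_not_mem K kb hkbK, List.map_append]
      congr 1
      · apply List.map_congr_left
        intro k' hk'K
        rw [hFnew k', if_neg (fun h => hkbK (by rw [h]; exact hk'K)), List.append_nil, hF]
      · have hofL : PySem.Set.ofList [m] = [m] := by
          simp [PySem.Set.ofList_eq_foldl, PySem.Set.add]
        have hFkb : F kb = [] := pv_filterMap_sel_nil qs kb
          (fun hmem => hkbK (by rw [hK, PySem.List.dedup_eq_ofList]; exact (PySem.Set.mem_ofList B kb).2 hmem))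
        simp only [List.map_cons, List.map_nil]
        rw [hofL, hFnew kb, hFkb, if_pos rfl, List.nil_append]

theorem best_linking_spec : Claim_equal_best_linking := by
  intro linking el2kbid _hdom hpre
  unfold Spec_best_linking best_linking best_linking_alt
  have hnd : (PySem.Dict.ofList el2kbid).keys.Nodup := PySem.Dict.nodup_keys_ofList el2kbid
  have hkeysdef : (PySem.Dict.ofList el2kbid).keys
      = (PySem.Dict.ofList el2kbid).items.map Prod.fst := by simp only [PySem.Dict.keys]
  have hvalsdef : (PySem.Dict.ofList el2kbid).values
      = (PySem.Dict.ofList el2kbid).items.map Prod.snd := by simp only [PySem.Dict.values]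
  have hknd : ((PySem.Dict.ofList el2kbid).items.map Prod.fst).Nodup := hkeysdef ▸ hnd
  -- A's fold over keys = the pair fold pvStep over the items
  have hA : ((PySem.Dict.ofList el2kbid).items.map Prod.fst).foldl
      (fun (nl : PySem.Dict String (PySem.Set String)) m =>
        match (PySem.Dict.ofList el2kbid).get? m with
        | none => nl
        | some links =>
          match PySem.List.pyGet? links 0 with
          | none => nl
          | some (kb_id, _conf) =>
            if nl.contains kb_id then nl.modify kb_id [] (fun s => PySem.Set.add s m)
            else nl.insert kb_id (PySem.Set.ofList [m])) PySem.Dict.empty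
      = (PySem.Dict.ofList el2kbid).items.foldl pvStep PySem.Dict.empty := by
    rw [List.foldl_map]
    apply PySem.List.foldl_congr_mem
    intro acc p hp
    have hg : (PySem.Dict.ofList el2kbid).get? p.1 = some p.2 :=
      PySem.Dict.get?_of_mem_items _ (by simpa using hp) hnd
    rw [hg]
    rfl
  -- B's order list over values = the same filterMap over the items
  have hO : (PySem.Dict.ofList el2kbid).values.filterMap pvBest
      = (PySem.Dict.ofList el2kbid).items.filterMap (fun p => pvBest p.2) := by
    rw [hvalsdef, List.filterMap_map]
    rfl
  simp only [hkeysdef, hA, hO]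
  exact pvMain _ hknd hpre
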